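-- pv_equiv track=rewrite | github.com/mispython/AimanPython | Conv_Py/EIBWCCR6.py | ndays_format
-- ===== SOURCE A (Python) =====
-- def ndays_format(nodays: int) -> int:
--     """Convert days overdue to arrears bucket (SAS NDAYS informat)."""
--     if nodays <= 0:
--         return 0
--     thresholds = [30, 60, 90, 120, 150, 180, 210, 240, 270, 300, 330, 365]
--     for i, t in enumerate(thresholds, 1):
--         if nodays <= t:
--             return i
--     return 24  # > 365 days: caller rounds nodays/30
-- ===== SOURCE B (Python) =====
-- def ndays_format(nodays: int) -> int:
--     """Convert days overdue to arrears bucket (SAS NDAYS informat)."""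
--     if nodays <= 0:
--         return 0
--     if nodays <= 330:
--         return (nodays + 29) // 30
--     if nodays <= 365:
--         return 12
--     return 24
-- ===== Notes on version B (the rewrite author's own statement) =====
-- stated objective: simpler
-- what changed: Replaced the threshold-list scan with closed-form ceiling division (nodays+29)//30 for 1..330 plus two range guards for the irregular 365 threshold and the >365 fallback.
import Mathlib
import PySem

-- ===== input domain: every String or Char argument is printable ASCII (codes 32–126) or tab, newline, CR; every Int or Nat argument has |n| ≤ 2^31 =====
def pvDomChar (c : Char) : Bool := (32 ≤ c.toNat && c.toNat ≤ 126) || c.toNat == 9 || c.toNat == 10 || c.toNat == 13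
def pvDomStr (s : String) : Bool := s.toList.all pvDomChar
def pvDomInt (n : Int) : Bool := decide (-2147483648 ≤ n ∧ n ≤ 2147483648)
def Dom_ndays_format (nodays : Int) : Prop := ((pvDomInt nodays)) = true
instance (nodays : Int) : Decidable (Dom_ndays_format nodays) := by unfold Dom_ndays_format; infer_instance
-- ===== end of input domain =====

-- B replaces A's threshold-list scan by closed-form ceiling division plus two range guards (simpler, O(1)).

-- ===== PORT A =====
-- the 'for i, t in enumerate(thresholds, 1)' loop: first pair (i, t) with nodays ≤ t wins, else 24
def ndaysScan (nodays : Int) : List (Int × Int) → Int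
  | [] => 24
  | (i, t) :: rest => if nodays ≤ t then i else ndaysScan nodays rest

def ndays_format (nodays : Int) : Int :=
  if nodays ≤ 0 then 0
  else ndaysScan nodays
    [(1, 30), (2, 60), (3, 90), (4, 120), (5, 150), (6, 180),
     (7, 210), (8, 240), (9, 270), (10, 300), (11, 330), (12, 365)]

-- ===== PORT B =====
def ndays_format_alt (nodays : Int) : Int :=
  if nodays ≤ 0 then 0
  else if nodays ≤ 330 then PySem.Int.floordiv (nodays + 29) 30
  else if nodays ≤ 365 then 12
  else 24

-- ===== PRECONDITION & SPEC =====
def Spec_ndays_format (nodays : Int) (out : Int) : Prop := out = ndays_format_alt nodays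
instance (nodays : Int) (out : Int) : Decidable (Spec_ndays_format nodays out) := by unfold Spec_ndays_format; infer_instance

-- ===== CLAIM (what is proved, stated in full; the proofs are below) =====
def Claim_equal_ndays_format : Prop := ∀ (nodays : Int), Dom_ndays_format nodays → Spec_ndays_format nodays (ndays_format nodays)

-- ===== LEMMAS AND PROOFS =====

-- ===== VERDICT (by name: the statement is the Claim_ definition above) =====
theorem ndays_format_spec : Claim_equal_ndays_format := by
  intro n _
  unfold Spec_ndays_format ndays_format ndays_format_alt
  have key : PySem.Int.floordiv (n + 29) 30 = (n + 29) / 30 := by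
    simp [PySem.Int.floordiv, Int.fdiv_eq_ediv_of_nonneg]
  simp only [ndaysScan, key]
  rcases (by omega : n ≤ 0 ∨ (0:Int) < n) with h0 | h0
  · simp only [if_pos h0]
  rcases (by omega : n ≤ 30 ∨ (30:Int) < n) with h1 | h1
  · simp only [if_neg (show ¬ n ≤ 0 by omega), if_pos (show n ≤ 30 by omega), if_pos (show n ≤ 60 by omega), if_pos (show n ≤ 90 by omega), if_pos (show n ≤ 120 by omega), if_pos (show n ≤ 150 by omega), if_pos (show n ≤ 180 by omega), if_pos (show n ≤ 210 by omega), if_pos (show n ≤ 240 by omega), if_pos (show n ≤ 270 by omega), if_pos (show n ≤ 300 by omega), if_pos (show n ≤ 330 by omega), if_pos (show n ≤ 365 by omega)]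
    try omega
  rcases (by omega : n ≤ 60 ∨ (60:Int) < n) with h2 | h2
  · simp only [if_neg (show ¬ n ≤ 0 by omega), if_neg (show ¬ n ≤ 30 by omega), if_pos (show n ≤ 60 by omega), if_pos (show n ≤ 90 by omega), if_pos (show n ≤ 120 by omega), if_pos (show n ≤ 150 by omega), if_pos (show n ≤ 180 by omega), if_pos (show n ≤ 210 by omega), if_pos (show n ≤ 240 by omega), if_pos (show n ≤ 270 by omega), if_pos (show n ≤ 300 by omega), if_pos (show n ≤ 330 by omega), if_pos (show n ≤ 365 by omega)]
    try omega
  rcases (by omega : n ≤ 90 ∨ (90:Int) < n) with h3 | h3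
  · simp only [if_neg (show ¬ n ≤ 0 by omega), if_neg (show ¬ n ≤ 30 by omega), if_neg (show ¬ n ≤ 60 by omega), if_pos (show n ≤ 90 by omega), if_pos (show n ≤ 120 by omega), if_pos (show n ≤ 150 by omega), if_pos (show n ≤ 180 by omega), if_pos (show n ≤ 210 by omega), if_pos (show n ≤ 240 by omega), if_pos (show n ≤ 270 by omega), if_pos (show n ≤ 300 by omega), if_pos (show n ≤ 330 by omega), if_pos (show n ≤ 365 by omega)]
    try omega
  rcases (by omega : n ≤ 120 ∨ (120:Int) < n) with h4 | h4
  · simp only [if_neg (show ¬ n ≤ 0 by omega), if_neg (show ¬ n ≤ 30 by omega), if_neg (show ¬ n ≤ 60 by omega), if_neg (show ¬ n ≤ 90 by omega), if_pos (show n ≤ 120 by omega), if_pos (show n ≤ 150 by omega), if_pos (show n ≤ 180 by omega), if_pos (show n ≤ 210 by omega), if_pos (show n ≤ 240 by omega), if_pos (show n ≤ 270 by omega), if_pos (show n ≤ 300 by omega), if_pos (show n ≤ 330 by omega), if_pos (show n ≤ 365 by omega)]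
    try omega
  rcases (by omega : n ≤ 150 ∨ (150:Int) < n) with h5 | h5
  · simp only [if_neg (show ¬ n ≤ 0 by omega), if_neg (show ¬ n ≤ 30 by omega), if_neg (show ¬ n ≤ 60 by omega), if_neg (show ¬ n ≤ 90 by omega), if_neg (show ¬ n ≤ 120 by omega), if_pos (show n ≤ 150 by omega), if_pos (show n ≤ 180 by omega), if_pos (show n ≤ 210 by omega), if_pos (show n ≤ 240 by omega), if_pos (show n ≤ 270 by omega), if_pos (show n ≤ 300 by omega), if_pos (show n ≤ 330 by omega), if_pos (show n ≤ 365 by omega)]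
    try omega
  rcases (by omega : n ≤ 180 ∨ (180:Int) < n) with h6 | h6
  · simp only [if_neg (show ¬ n ≤ 0 by omega), if_neg (show ¬ n ≤ 30 by omega), if_neg (show ¬ n ≤ 60 by omega), if_neg (show ¬ n ≤ 90 by omega), if_neg (show ¬ n ≤ 120 by omega), if_neg (show ¬ n ≤ 150 by omega), if_pos (show n ≤ 180 by omega), if_pos (show n ≤ 210 by omega), if_pos (show n ≤ 240 by omega), if_pos (show n ≤ 270 by omega), if_pos (show n ≤ 300 by omega), if_pos (show n ≤ 330 by omega), if_pos (show n ≤ 365 by omega)]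
    try omega
  rcases (by omega : n ≤ 210 ∨ (210:Int) < n) with h7 | h7
  · simp only [if_neg (show ¬ n ≤ 0 by omega), if_neg (show ¬ n ≤ 30 by omega), if_neg (show ¬ n ≤ 60 by omega), if_neg (show ¬ n ≤ 90 by omega), if_neg (show ¬ n ≤ 120 by omega), if_neg (show ¬ n ≤ 150 by omega), if_neg (show ¬ n ≤ 180 by omega), if_pos (show n ≤ 210 by omega), if_pos (show n ≤ 240 by omega), if_pos (show n ≤ 270 by omega), if_pos (show n ≤ 300 by omega), if_pos (show n ≤ 330 by omega), if_pos (show n ≤ 365 by omega)]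
    try omega
  rcases (by omega : n ≤ 240 ∨ (240:Int) < n) with h8 | h8
  · simp only [if_neg (show ¬ n ≤ 0 by omega), if_neg (show ¬ n ≤ 30 by omega), if_neg (show ¬ n ≤ 60 by omega), if_neg (show ¬ n ≤ 90 by omega), if_neg (show ¬ n ≤ 120 by omega), if_neg (show ¬ n ≤ 150 by omega), if_neg (show ¬ n ≤ 180 by omega), if_neg (show ¬ n ≤ 210 by omega), if_pos (show n ≤ 240 by omega), if_pos (show n ≤ 270 by omega), if_pos (show n ≤ 300 by omega), if_pos (show n ≤ 330 by omega), if_pos (show n ≤ 365 by omega)]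
    try omega
  rcases (by omega : n ≤ 270 ∨ (270:Int) < n) with h9 | h9
  · simp only [if_neg (show ¬ n ≤ 0 by omega), if_neg (show ¬ n ≤ 30 by omega), if_neg (show ¬ n ≤ 60 by omega), if_neg (show ¬ n ≤ 90 by omega), if_neg (show ¬ n ≤ 120 by omega), if_neg (show ¬ n ≤ 150 by omega), if_neg (show ¬ n ≤ 180 by omega), if_neg (show ¬ n ≤ 210 by omega), if_neg (show ¬ n ≤ 240 by omega), if_pos (show n ≤ 270 by omega), if_pos (show n ≤ 300 by omega), if_pos (show n ≤ 330 by omega), if_pos (show n ≤ 365 by omega)]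
    try omega
  rcases (by omega : n ≤ 300 ∨ (300:Int) < n) with h10 | h10
  · simp only [if_neg (show ¬ n ≤ 0 by omega), if_neg (show ¬ n ≤ 30 by omega), if_neg (show ¬ n ≤ 60 by omega), if_neg (show ¬ n ≤ 90 by omega), if_neg (show ¬ n ≤ 120 by omega), if_neg (show ¬ n ≤ 150 by omega), if_neg (show ¬ n ≤ 180 by omega), if_neg (show ¬ n ≤ 210 by omega), if_neg (show ¬ n ≤ 240 by omega), if_neg (show ¬ n ≤ 270 by omega), if_pos (show n ≤ 300 by omega), if_pos (show n ≤ 330 by omega), if_pos (show n ≤ 365 by omega)]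
    try omega
  rcases (by omega : n ≤ 330 ∨ (330:Int) < n) with h11 | h11
  · simp only [if_neg (show ¬ n ≤ 0 by omega), if_neg (show ¬ n ≤ 30 by omega), if_neg (show ¬ n ≤ 60 by omega), if_neg (show ¬ n ≤ 90 by omega), if_neg (show ¬ n ≤ 120 by omega), if_neg (show ¬ n ≤ 150 by omega), if_neg (show ¬ n ≤ 180 by omega), if_neg (show ¬ n ≤ 210 by omega), if_neg (show ¬ n ≤ 240 by omega), if_neg (show ¬ n ≤ 270 by omega), if_neg (show ¬ n ≤ 300 by omega), if_pos (show n ≤ 330 by omega), if_pos (show n ≤ 365 by omega)]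
    try omega
  rcases (by omega : n ≤ 365 ∨ (365:Int) < n) with h12 | h12
  · simp only [if_neg (show ¬ n ≤ 0 by omega), if_neg (show ¬ n ≤ 30 by omega), if_neg (show ¬ n ≤ 60 by omega), if_neg (show ¬ n ≤ 90 by omega), if_neg (show ¬ n ≤ 120 by omega), if_neg (show ¬ n ≤ 150 by omega), if_neg (show ¬ n ≤ 180 by omega), if_neg (show ¬ n ≤ 210 by omega), if_neg (show ¬ n ≤ 240 by omega), if_neg (show ¬ n ≤ 270 by omega), if_neg (show ¬ n ≤ 300 by omega), if_neg (show ¬ n ≤ 330 by omega), if_pos (show n ≤ 365 by omega)]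
    try omega
  simp only [if_neg (show ¬ n ≤ 0 by omega), if_neg (show ¬ n ≤ 30 by omega), if_neg (show ¬ n ≤ 60 by omega), if_neg (show ¬ n ≤ 90 by omega), if_neg (show ¬ n ≤ 120 by omega), if_neg (show ¬ n ≤ 150 by omega), if_neg (show ¬ n ≤ 180 by omega), if_neg (show ¬ n ≤ 210 by omega), if_neg (show ¬ n ≤ 240 by omega), if_neg (show ¬ n ≤ 270 by omega), if_neg (show ¬ n ≤ 300 by omega), if_neg (show ¬ n ≤ 330 by omega), if_neg (show ¬ n ≤ 365 by omega)]
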